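-- pv_equiv track=rewrite | github.com/HallowayE/APCSP | TheProject/WearingColor.py | mostColor
-- ===== SOURCE A (Python) =====
-- def mostColor(student, length, color):
--   num = []
--   max = 0
--   most = []
--   for i in range(length):
--     num.append(0)
--     if student[i][1].upper()==color.upper():
--       num[i]+=1
--     if student[i][2].upper()==color.upper():
--       num[i]+=1
--     if student[i][3].upper()==color.upper():
--       num[i]+=1
--     if num[i]>max:
--       max=num[i]
--   for i in range(len(num)):
--     if num[i] == max:
--       most.append(student[i][0])
--
--   ret = ""
--
--   for i in most:
--     ret+= i+", "
--   return ret.strip(", ")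
-- ===== SOURCE B (Python) =====
-- def mostColor(student, length, color):
--   curmax = 0
--   most = []
--   for i in range(length):
--     c = 0
--     if student[i][1].upper() == color.upper():
--       c += 1
--     if student[i][2].upper() == color.upper():
--       c += 1
--     if student[i][3].upper() == color.upper():
--       c += 1
--     if c > curmax:
--       curmax = c
--       most = [student[i][0]]
--     elif c == curmax:
--       most.append(student[i][0])
--   ret = ""
--   for i in most:
--     ret += i + ", "
--   return ret.strip(", ")
-- ===== Notes on version B (the rewrite author's own statement) =====
-- stated objective: simpler
-- what changed: A's two passes (build a per-student count array while tracking the max, then rescan the array to collect names) are merged into one argmax pass that keeps only the running max and the current best-name list, eliminating the num array and the second loop.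
import Mathlib
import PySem

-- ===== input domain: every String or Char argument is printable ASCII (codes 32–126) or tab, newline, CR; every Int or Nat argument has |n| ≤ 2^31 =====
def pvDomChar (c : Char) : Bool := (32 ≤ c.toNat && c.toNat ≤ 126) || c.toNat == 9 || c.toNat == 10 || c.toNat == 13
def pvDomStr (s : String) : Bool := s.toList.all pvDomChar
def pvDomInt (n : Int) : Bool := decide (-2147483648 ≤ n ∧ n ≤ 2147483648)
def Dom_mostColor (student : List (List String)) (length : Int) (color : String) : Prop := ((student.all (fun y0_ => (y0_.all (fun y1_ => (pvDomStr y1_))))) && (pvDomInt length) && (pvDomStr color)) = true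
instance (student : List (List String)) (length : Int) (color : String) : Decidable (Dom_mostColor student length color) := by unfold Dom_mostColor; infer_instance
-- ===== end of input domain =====

-- B replaces A's two passes (count array + max, then a collection pass) by one pass that
-- maintains the running max and the current best-name list (objective: simpler, one pass).

-- ===== PORT A =====
def mostColor (student : List (List String)) (length : Int) (color : String) : String :=
  let st := (PySem.List.pyRange 0 length 1).foldl
    (fun (st : List Int × Int) i =>
      let num := st.1 ++ [0]
      let num := if PySem.Str.upper (PySem.List.pyGetD (PySem.List.pyGetD student i []) 1 "") == PySem.Str.upper color
                 then PySem.List.pySetD num i (PySem.List.pyGetD num i 0 + 1) else num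
      let num := if PySem.Str.upper (PySem.List.pyGetD (PySem.List.pyGetD student i []) 2 "") == PySem.Str.upper color
                 then PySem.List.pySetD num i (PySem.List.pyGetD num i 0 + 1) else num
      let num := if PySem.Str.upper (PySem.List.pyGetD (PySem.List.pyGetD student i []) 3 "") == PySem.Str.upper color
                 then PySem.List.pySetD num i (PySem.List.pyGetD num i 0 + 1) else num
      let mx := if PySem.List.pyGetD num i 0 > st.2 then PySem.List.pyGetD num i 0 else st.2
      (num, mx)) ([], 0)
  let num := st.1
  let mx := st.2
  let most := (PySem.List.pyRange 0 (num.length : Int) 1).foldl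
    (fun most i =>
      if PySem.List.pyGetD num i 0 == mx
      then most ++ [PySem.List.pyGetD (PySem.List.pyGetD student i []) 0 ""] else most) ([] : List String)
  let ret := most.foldl (fun r n => r ++ n ++ ", ") ""
  PySem.Str.stripChars ret ", "

-- ===== PORT B =====
def mostColor_alt (student : List (List String)) (length : Int) (color : String) : String :=
  let st := (PySem.List.pyRange 0 length 1).foldl
    (fun (st : Int × List String) i =>
      let row := PySem.List.pyGetD student i []
      let c : Int := 0
      let c := if PySem.Str.upper (PySem.List.pyGetD row 1 "") == PySem.Str.upper color then c + 1 else c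
      let c := if PySem.Str.upper (PySem.List.pyGetD row 2 "") == PySem.Str.upper color then c + 1 else c
      let c := if PySem.Str.upper (PySem.List.pyGetD row 3 "") == PySem.Str.upper color then c + 1 else c
      if c > st.1 then (c, [PySem.List.pyGetD row 0 ""])
      else if c == st.1 then (st.1, st.2 ++ [PySem.List.pyGetD row 0 ""])
      else st) ((0 : Int), ([] : List String))
  let ret := st.2.foldl (fun r n => r ++ n ++ ", ") ""
  PySem.Str.stripChars ret ", "

-- ===== PRECONDITION & SPEC =====
-- Pre_ excludes exactly the inputs where Python A raises IndexError: an index i < length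
-- beyond student, or a scanned row with fewer than 4 entries.
def Pre_mostColor (student : List (List String)) (length : Int) (color : String) : Prop :=
  length ≤ (student.length : Int) ∧ ∀ row ∈ student.take length.toNat, 4 ≤ row.length
instance (student : List (List String)) (length : Int) (color : String) : Decidable (Pre_mostColor student length color) := by unfold Pre_mostColor; infer_instance
def pvWitness_mostColor : List (List String) × Int × String :=
  ([["Al", "red", "blue", "red"], ["Bo", "RED", "green", "red"]], 2, "Red")

def Spec_mostColor (student : List (List String)) (length : Int) (color : String) (out : String) : Prop := out = mostColor_alt student length color
instance (student : List (List String)) (length : Int) (color : String) (out : String) : Decidable (Spec_mostColor student length color out) := by unfold Spec_mostColor; infer_instance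

-- ===== CLAIM (what is proved, stated in full; the proofs are below) =====
def Claim_equal_mostColor : Prop := ∀ (student : List (List String)) (length : Int) (color : String), Dom_mostColor student length color → Pre_mostColor student length color → Spec_mostColor student length color (mostColor student length color)

-- ===== LEMMAS AND PROOFS =====

-- the per-student match count (value of A's num[i] and of B's c at index k)
def pvCnt (student : List (List String)) (color : String) (k : Nat) : Int :=
  let row := PySem.List.pyGetD student (k : Int) []
  let c : Int := 0
  let c := if PySem.Str.upper (PySem.List.pyGetD row 1 "") == PySem.Str.upper color then c + 1 else c
  let c := if PySem.Str.upper (PySem.List.pyGetD row 2 "") == PySem.Str.upper color then c + 1 else c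
  let c := if PySem.Str.upper (PySem.List.pyGetD row 3 "") == PySem.Str.upper color then c + 1 else c
  c

def pvName (student : List (List String)) (k : Nat) : String :=
  PySem.List.pyGetD (PySem.List.pyGetD student (k : Int) []) 0 ""

-- running maximum of the counts over the first n students
def pvMax (student : List (List String)) (color : String) (n : Nat) : Int :=
  ((List.range n).map (pvCnt student color)).foldl (fun a b => if b > a then b else a) 0

-- the step function of A's counting loop (definitionally the lambda inside mostColor)
def pvStepA (student : List (List String)) (color : String) : List Int × Int → Int → List Int × Int :=
  fun st i =>
      let num := st.1 ++ [0]
      let num := if PySem.Str.upper (PySem.List.pyGetD (PySem.List.pyGetD student i []) 1 "") == PySem.Str.upper color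
                 then PySem.List.pySetD num i (PySem.List.pyGetD num i 0 + 1) else num
      let num := if PySem.Str.upper (PySem.List.pyGetD (PySem.List.pyGetD student i []) 2 "") == PySem.Str.upper color
                 then PySem.List.pySetD num i (PySem.List.pyGetD num i 0 + 1) else num
      let num := if PySem.Str.upper (PySem.List.pyGetD (PySem.List.pyGetD student i []) 3 "") == PySem.Str.upper color
                 then PySem.List.pySetD num i (PySem.List.pyGetD num i 0 + 1) else num
      let mx := if PySem.List.pyGetD num i 0 > st.2 then PySem.List.pyGetD num i 0 else st.2
      (num, mx)

-- the step function of B's single pass (definitionally the lambda inside mostColor_alt)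
def pvStepB (student : List (List String)) (color : String) : Int × List String → Int → Int × List String :=
  fun st i =>
      let row := PySem.List.pyGetD student i []
      let c : Int := 0
      let c := if PySem.Str.upper (PySem.List.pyGetD row 1 "") == PySem.Str.upper color then c + 1 else c
      let c := if PySem.Str.upper (PySem.List.pyGetD row 2 "") == PySem.Str.upper color then c + 1 else c
      let c := if PySem.Str.upper (PySem.List.pyGetD row 3 "") == PySem.Str.upper color then c + 1 else c
      if c > st.1 then (c, [PySem.List.pyGetD row 0 ""])
      else if c == st.1 then (st.1, st.2 ++ [PySem.List.pyGetD row 0 ""])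
      else st

def pvMost (student : List (List String)) (color : String) (n : Nat) (t : Int) : List String :=
  ((List.range n).filter (fun k => pvCnt student color k == t)).map (pvName student)

def pvIdx (n : Nat) : List Int := (List.range n).map Int.ofNat

lemma pvIdx_succ (n : Nat) : pvIdx (n + 1) = pvIdx n ++ [(n : Int)] := by
  simp [pvIdx, List.range_succ]

lemma pvRangeZero (L : Int) : PySem.List.pyRange 0 L 1 = pvIdx L.toNat := by
  rw [PySem.List.pyRange_one, pvIdx, Int.sub_zero]
  apply List.map_congr_left
  intro x _
  simp

lemma pvSetLast (xs : List Int) (v w : Int) : (xs ++ [v]).set xs.length w = xs ++ [w] := by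
  induction xs with
  | nil => rfl
  | cons x xs ih => simp [ih]

lemma pvGetDMap (s : List (List String)) (c : String) (n k : Nat) (h : k < n) (d : Int) :
    ((List.range n).map (pvCnt s c)).getD k d = pvCnt s c k := by
  simp [List.getD, h]

lemma pvMax_succ (s : List (List String)) (c : String) (n : Nat) :
    pvMax s c (n + 1) = if pvCnt s c n > pvMax s c n then pvCnt s c n else pvMax s c n := by
  simp [pvMax, List.range_succ]

lemma pvMax_le (s : List (List String)) (c : String) (n k : Nat) (h : k < n) : pvCnt s c k ≤ pvMax s c n := by
  induction n with
  | zero => omega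
  | succ m ih =>
    rw [pvMax_succ]
    rcases Nat.lt_succ_iff_lt_or_eq.mp h with h' | h'
    · have := ih h'; split <;> omega
    · subst h'; split <;> omega

lemma pvMost_succ (s : List (List String)) (c : String) (n : Nat) (t : Int) :
    pvMost s c (n + 1) t = pvMost s c n t ++ (if pvCnt s c n == t then [pvName s n] else []) := by
  by_cases h : pvCnt s c n == t <;> simp [pvMost, List.range_succ, List.filter_append, h]

lemma pvMost_gt (s : List (List String)) (c : String) (n : Nat) (t : Int)
    (h : pvMax s c n < t) : pvMost s c n t = [] := by
  rw [pvMost]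
  have : (List.range n).filter (fun k => pvCnt s c k == t) = [] := by
    rw [List.filter_eq_nil_iff]
    intro k hk
    have := pvMax_le s c n k (List.mem_range.mp hk)
    simp only [beq_iff_eq]
    omega
  rw [this]; rfl

lemma pvStepA_spec (s : List (List String)) (c : String) (xs : List Int) (mx : Int) (n : Nat)
    (hlen : xs.length = n) :
    pvStepA s c (xs, mx) (n : Int)
      = (xs ++ [pvCnt s c n], if pvCnt s c n > mx then pvCnt s c n else mx) := by
  subst hlen
  simp only [pvStepA, pvCnt, PySem.List.pyGetD_natCast, PySem.List.pySetD_natCast]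
  split_ifs <;> simp_all [pvSetLast] <;> omega  -- pvSetLast normalises (xs ++ [v]).set xs.length w

lemma pvStepB_spec (s : List (List String)) (c : String) (mx : Int) (most : List String) (n : Nat) :
    pvStepB s c (mx, most) (n : Int)
      = (if pvCnt s c n > mx then (pvCnt s c n, [pvName s n])
         else if pvCnt s c n == mx then (mx, most ++ [pvName s n])
         else (mx, most)) := by
  rfl

lemma pvA1 (s : List (List String)) (c : String) (n : Nat) :
    (pvIdx n).foldl (pvStepA s c) ([], 0)
      = ((List.range n).map (pvCnt s c), pvMax s c n) := by
  induction n with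
  | zero => rfl
  | succ m ih =>
    rw [pvIdx_succ, List.foldl_append, ih]
    simp only [List.foldl_cons, List.foldl_nil]
    rw [pvStepA_spec s c _ _ m (by simp), pvMax_succ, List.range_succ, List.map_append]
    rfl

lemma pvA2 (s : List (List String)) (c : String) (N : Nat) (t : Int) (n : Nat) (h : n ≤ N) :
    (pvIdx n).foldl
      (fun most i => if PySem.List.pyGetD ((List.range N).map (pvCnt s c)) i 0 == t
        then most ++ [PySem.List.pyGetD (PySem.List.pyGetD s i []) 0 ""] else most) ([] : List String)
      = pvMost s c n t := by
  induction n with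
  | zero => rfl
  | succ m ih =>
    rw [pvIdx_succ, List.foldl_append, ih (by omega)]
    simp only [List.foldl_cons, List.foldl_nil, PySem.List.pyGetD_natCast]
    rw [pvGetDMap s c N m (by omega), pvMost_succ]
    by_cases hc : pvCnt s c m == t <;> simp [hc, pvName]

lemma pvB1 (s : List (List String)) (c : String) (n : Nat) :
    (pvIdx n).foldl (pvStepB s c) (0, [])
      = (pvMax s c n, pvMost s c n (pvMax s c n)) := by
  induction n with
  | zero => rfl
  | succ m ih =>
    rw [pvIdx_succ, List.foldl_append, ih]
    simp only [List.foldl_cons, List.foldl_nil]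
    rw [pvStepB_spec, pvMax_succ]
    by_cases h1 : pvCnt s c m > pvMax s c m
    · simp only [if_pos h1]
      rw [pvMost_succ, pvMost_gt s c m _ (by omega)]
      simp
    · simp only [if_neg h1]
      by_cases h2 : pvCnt s c m == pvMax s c m
      · simp only [pvMost_succ, h2]
        simp
      · simp only [pvMost_succ, h2]
        simp

theorem mostColor_spec : Claim_equal_mostColor := by
  intro s L c _ _
  unfold Spec_mostColor
  have hA : mostColor s L c =
      (let st := (PySem.List.pyRange 0 L 1).foldl (pvStepA s c) ([], 0)
       let most := (PySem.List.pyRange 0 (st.1.length : Int) 1).foldl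
         (fun most i => if PySem.List.pyGetD st.1 i 0 == st.2
           then most ++ [PySem.List.pyGetD (PySem.List.pyGetD s i []) 0 ""] else most) ([] : List String)
       PySem.Str.stripChars (most.foldl (fun r n => r ++ n ++ ", ") "") ", ") := rfl
  have hB : mostColor_alt s L c =
      (let st := (PySem.List.pyRange 0 L 1).foldl (pvStepB s c) (0, [])
       PySem.Str.stripChars (st.2.foldl (fun r n => r ++ n ++ ", ") "") ", ") := rfl
  rw [hA, hB]
  simp only [pvRangeZero, pvA1, pvB1]
  have hlen : (((List.range L.toNat).map (pvCnt s c)).length : Int).toNat = L.toNat := by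
    simp
    omega
  rw [hlen, pvA2 s c L.toNat _ L.toNat (le_refl _)]
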